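-- pv_equiv track=rewrite | github.com/hersheydoria/PetTrackCare | analyze_services/analyze_behavior.py | _match_missing_alert_post
-- ===== SOURCE A (Python) =====
-- def _match_missing_alert_post(posts: list[dict], pet_id: str | None, owner_id: str | None, pet_name: str | None) -> dict | None:
--     normalized_name = (pet_name or "").strip().lower()
--     for post in posts:
--         if not post:
--             continue
--         post_pet_id = post.get("pet_id")
--         if pet_id and post_pet_id and str(post_pet_id) == str(pet_id):
--             return post
--     if owner_id or normalized_name:
--         for post in posts:
--             if not post:
--                 continue
--             if owner_id and post.get("user_id") == owner_id:
--                 content = (post.get("content") or "").lower()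
--                 if not normalized_name or normalized_name in content:
--                     return post
--     for post in posts:
--         if not post:
--             continue
--         content = (post.get("content") or "").lower()
--         if normalized_name and normalized_name in content:
--             return post
--     return None
-- ===== SOURCE B (Python) =====
-- def _match_missing_alert_post(posts: list[dict], pet_id: str | None, owner_id: str | None, pet_name: str | None) -> dict | None:
--     normalized_name = (pet_name or "").strip().lower()
--     owner_match = None   # first post matching the owner_id (+ name) tier
--     name_match = None    # first post matching the name-only tier
--     for post in posts:
--         if not post:
--             continue
--         post_pet_id = post.get("pet_id")
--         if pet_id and post_pet_id and str(post_pet_id) == str(pet_id):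
--             return post
--         content = (post.get("content") or "").lower()
--         if (owner_match is None and owner_id and post.get("user_id") == owner_id
--                 and (not normalized_name or normalized_name in content)):
--             owner_match = post
--         if name_match is None and normalized_name and normalized_name in content:
--             name_match = post
--     return owner_match if owner_match is not None else name_match
-- ===== Notes on version B (the rewrite author's own statement) =====
-- stated objective: simpler
-- what changed: Replaces A's three separate scans over posts with one single pass that returns immediately on a pet_id match and records the first owner-tier and name-tier matches in two slots.
import Mathlib
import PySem

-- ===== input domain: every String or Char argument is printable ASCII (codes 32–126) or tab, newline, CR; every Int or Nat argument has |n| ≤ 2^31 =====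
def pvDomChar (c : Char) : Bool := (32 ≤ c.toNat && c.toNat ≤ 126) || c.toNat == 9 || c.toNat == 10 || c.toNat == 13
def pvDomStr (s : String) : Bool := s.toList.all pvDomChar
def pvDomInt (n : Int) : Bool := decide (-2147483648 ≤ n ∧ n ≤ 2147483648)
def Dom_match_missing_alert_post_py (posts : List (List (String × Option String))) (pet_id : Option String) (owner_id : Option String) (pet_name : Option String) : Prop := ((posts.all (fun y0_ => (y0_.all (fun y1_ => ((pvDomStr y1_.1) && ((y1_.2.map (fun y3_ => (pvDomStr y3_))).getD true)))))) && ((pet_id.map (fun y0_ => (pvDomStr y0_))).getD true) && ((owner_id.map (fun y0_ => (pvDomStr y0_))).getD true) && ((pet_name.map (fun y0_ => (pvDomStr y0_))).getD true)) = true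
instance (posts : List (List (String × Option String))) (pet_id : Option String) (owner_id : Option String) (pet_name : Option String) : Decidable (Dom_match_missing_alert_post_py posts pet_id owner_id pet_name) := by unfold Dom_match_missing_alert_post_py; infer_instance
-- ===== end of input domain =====

-- B replaces A's three sequential scans over posts by one single pass keeping two 'first match' slots; objective: simpler.

-- ===== PORT A =====
-- Python truthiness of an optional string (None and "" are falsy)
def pvTruthy (o : Option String) : Bool := o.getD "" != ""

-- post.get(k): none both when the key is absent and when its value is None, as in Python
def pvGet (post : List (String × Option String)) (k : String) : Option String :=
  (PySem.Dict.get? (PySem.Dict.mk post) k).join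

-- (post.get("content") or "").lower()
def pvContent (post : List (String × Option String)) : String :=
  PySem.Str.lower ((pvGet post "content").getD "")

-- tier 1: pet_id and post_pet_id and str(post_pet_id) == str(pet_id)  (str of a str is itself)
def pvC1 (pet_id : Option String) (post : List (String × Option String)) : Bool :=
  pvTruthy pet_id && pvTruthy (pvGet post "pet_id") && (pvGet post "pet_id" == pet_id)

-- tier 2: owner_id and post.get("user_id") == owner_id and (not normalized_name or normalized_name in content)
def pvC2 (owner_id : Option String) (nn : String) (post : List (String × Option String)) : Bool :=
  pvTruthy owner_id && (pvGet post "user_id" == owner_id) &&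
    (nn == "" || PySem.Str.isIn nn (pvContent post))

-- tier 3: normalized_name and normalized_name in content
def pvC3 (nn : String) (post : List (String × Option String)) : Bool :=
  (nn != "") && PySem.Str.isIn nn (pvContent post)

def match_missing_alert_post_py (posts : List (List (String × Option String))) (pet_id : Option String) (owner_id : Option String) (pet_name : Option String) : Option (List (String × Option String)) :=
  let nn := PySem.Str.lower (PySem.Str.strip (pet_name.getD ""))
  match posts.find? (fun p => p != [] && pvC1 pet_id p) with
  | some p => some p
  | none =>
    match (if pvTruthy owner_id || nn != "" then
             posts.find? (fun p => p != [] && pvC2 owner_id nn p)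
           else none) with
    | some p => some p
    | none => posts.find? (fun p => p != [] && pvC3 nn p)

-- ===== PORT B =====
-- single pass: return on a tier-1 hit, record the first tier-2 / tier-3 hits in slots
def pvAltLoop (pet_id owner_id : Option String) (nn : String) :
    List (List (String × Option String)) → Option (List (String × Option String)) →
    Option (List (String × Option String)) → Option (List (String × Option String))
  | [], s2, s3 => if s2.isSome then s2 else s3
  | p :: rest, s2, s3 =>
    if p == [] then pvAltLoop pet_id owner_id nn rest s2 s3
    else if pvC1 pet_id p then some p
    else pvAltLoop pet_id owner_id nn rest
      (if s2.isNone && pvC2 owner_id nn p then some p else s2)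
      (if s3.isNone && pvC3 nn p then some p else s3)

def match_missing_alert_post_py_alt (posts : List (List (String × Option String))) (pet_id : Option String) (owner_id : Option String) (pet_name : Option String) : Option (List (String × Option String)) :=
  pvAltLoop pet_id owner_id (PySem.Str.lower (PySem.Str.strip (pet_name.getD ""))) posts none none

-- ===== PRECONDITION & SPEC =====
def Spec_match_missing_alert_post_py (posts : List (List (String × Option String))) (pet_id : Option String) (owner_id : Option String) (pet_name : Option String) (out : Option (List (String × Option String))) : Prop := out = match_missing_alert_post_py_alt posts pet_id owner_id pet_name
instance (posts : List (List (String × Option String))) (pet_id : Option String) (owner_id : Option String) (pet_name : Option String) (out : Option (List (String × Option String))) : Decidable (Spec_match_missing_alert_post_py posts pet_id owner_id pet_name out) := by unfold Spec_match_missing_alert_post_py; infer_instance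

-- ===== CLAIM (what is proved, stated in full; the proofs are below) =====
def Claim_equal_match_missing_alert_post_py : Prop := ∀ (posts : List (List (String × Option String))) (pet_id : Option String) (owner_id : Option String) (pet_name : Option String), Dom_match_missing_alert_post_py posts pet_id owner_id pet_name → Spec_match_missing_alert_post_py posts pet_id owner_id pet_name (match_missing_alert_post_py posts pet_id owner_id pet_name)

-- ===== LEMMAS AND PROOFS =====
-- loop invariant: the single pass with slots s2, s3 computes the three-scan result with
-- the slots taking precedence over the remaining tier-2 / tier-3 scans
theorem pvAltLoop_eq (pet_id owner_id : Option String) (nn : String) :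
    ∀ (posts : List (List (String × Option String))) (s2 s3 : Option (List (String × Option String))),
    pvAltLoop pet_id owner_id nn posts s2 s3 =
      match posts.find? (fun p => p != [] && pvC1 pet_id p) with
      | some p => some p
      | none =>
        let r2 := if s2.isSome then s2 else posts.find? (fun p => p != [] && pvC2 owner_id nn p)
        if r2.isSome then r2
        else if s3.isSome then s3 else posts.find? (fun p => p != [] && pvC3 nn p) := by
  intro posts
  induction posts with
  | nil =>
    intro s2 s3
    simp only [pvAltLoop, List.find?]
    cases s2 <;> cases s3 <;> simp
  | cons p rest ih =>
    intro s2 s3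
    by_cases hp : p = []
    · subst hp
      simp only [pvAltLoop, List.find?]
      simpa using ih s2 s3
    · have hp' : (p == ([] : List (String × Option String))) = false := by
        simpa using hp
      have hne : (p != ([] : List (String × Option String))) = true := by
        simpa using hp
      by_cases h1 : pvC1 pet_id p = true
      · simp [pvAltLoop, hp', hne, h1]
      · simp only [pvAltLoop, hp', Bool.false_eq_true, if_false, h1]
        rw [ih]
        cases s2 <;> cases s3 <;>
          by_cases h2 : pvC2 owner_id nn p = true <;>
          by_cases h3 : pvC3 nn p = true <;>
          simp [hne, h1, h2, h3]

-- A's guard 'if owner_id or normalized_name' is redundant: when it is false both inner scans find nothing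
theorem find_c2_none (posts : List (List (String × Option String))) (owner_id : Option String) (nn : String)
    (h : pvTruthy owner_id = false) :
    posts.find? (fun p => p != [] && pvC2 owner_id nn p) = none := by
  rw [List.find?_eq_none]
  intro p _
  simp [pvC2, h]

theorem find_c3_none (posts : List (List (String × Option String))) (nn : String)
    (h : nn = "") :
    posts.find? (fun p => p != [] && pvC3 nn p) = none := by
  rw [List.find?_eq_none]
  intro p _
  simp [pvC3, h]

-- ===== VERDICT (by name: the statement is the Claim_ definition above) =====
theorem match_missing_alert_post_py_spec : Claim_equal_match_missing_alert_post_py := by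
  intro posts pet_id owner_id pet_name _
  unfold Spec_match_missing_alert_post_py match_missing_alert_post_py match_missing_alert_post_py_alt
  rw [pvAltLoop_eq]
  set nn := PySem.Str.lower (PySem.Str.strip (pet_name.getD "")) with hnn
  cases hf1 : posts.find? (fun p => p != [] && pvC1 pet_id p) with
  | some p => simp
  | none =>
    by_cases hg : (pvTruthy owner_id || nn != "") = true
    · simp only [hg, if_pos, Option.isSome_none, Bool.false_eq_true, if_false]
      cases hf2 : posts.find? (fun p => p != [] && pvC2 owner_id nn p) <;> simp
    · have ho : pvTruthy owner_id = false := by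
        cases h : pvTruthy owner_id <;> simp_all
      have hn : nn = "" := by
        by_cases h : nn = "" <;> simp_all
      simp [hg, find_c2_none posts owner_id nn ho, find_c3_none posts nn hn]
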